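-- pv_equiv track=rewrite | github.com/pypi-data/pypi-mirror-400 | packages/shex/shex-0.1.6-py3-none-any.whl/shex/tools.py | process_carriage_return
-- ===== SOURCE A (Python) =====
-- def process_carriage_return(text: str) -> str:
--     """
--     处理包含 \\r (回车) 的文本，模拟终端对进度条的显示行为
--
--     进度条通常使用 \\r 回到行首覆盖之前的内容，本函数将：
--     - 同一行内的多次 \\r 覆盖合并为最终显示内容
--     - 保留正常的换行符 \\n
--
--     Args:
--         text: 包含 \\r 的原始文本
--
--     Returns:
--         处理后的文本，只保留最终显示内容
--     """
--     if '\r' not in text: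
--         return text
--
--     lines = []
--     current_line = ""
--
--     i = 0
--     while i < len(text):
--         char = text[i]
--
--         if char == '\n':
--             # 换行：保存当前行并开始新行
--             lines.append(current_line)
--             current_line = ""
--         elif char == '\r':
--             # 检查是否是 \r\n (Windows 换行)
--             if i + 1 < len(text) and text[i + 1] == '\n':
--                 lines.append(current_line)
--                 current_line = ""
--                 i += 1  # 跳过 \n
--             else:
--                 # 单独的 \r：回到行首（清空当前行以准备覆盖）
--                 current_line = ""
--         else:
--             current_line += char
--
--         i += 1
--
--     # 添加最后一行（如果有）
--     if current_line:
--         lines.append(current_line)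
--
--     return '\n'.join(lines)
-- ===== SOURCE B (Python) =====
-- def process_carriage_return(text: str) -> str:
--     if '\r' not in text:
--         return text
--     segments = [seg.rpartition('\r')[2] for seg in text.replace('\r\n', '\n').split('\n')]
--     if segments and segments[-1] == '':
--         segments.pop()
--     return '\n'.join(segments)
-- ===== Notes on version B (the rewrite author's own statement) =====
-- stated objective: simpler
-- what changed: The index-based while loop with \r\n lookahead and (current_line, lines) state is replaced by a pipeline: normalize \r\n to \n, split on \n, keep each line's suffix after its last \r via rpartition, drop one trailing empty segment, join.
import Mathlib
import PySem

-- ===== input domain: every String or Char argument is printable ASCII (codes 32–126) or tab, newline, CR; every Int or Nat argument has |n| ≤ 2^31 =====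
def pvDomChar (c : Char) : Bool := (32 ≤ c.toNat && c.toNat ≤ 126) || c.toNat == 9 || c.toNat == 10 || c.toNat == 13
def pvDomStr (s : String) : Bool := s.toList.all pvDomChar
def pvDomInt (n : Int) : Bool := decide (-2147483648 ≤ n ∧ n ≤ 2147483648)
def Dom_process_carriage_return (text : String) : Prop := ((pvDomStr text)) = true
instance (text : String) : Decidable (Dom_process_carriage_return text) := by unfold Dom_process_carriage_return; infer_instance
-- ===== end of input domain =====

-- B replaces the index-and-state while loop by a replace/split/rpartition pipeline: simpler decomposition, same result.

-- ===== PORT A =====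
-- the while loop over i with state (current_line, lines); 'text[i+1] == "\n"' is the head? test, skipping the '\n' is tail
def pvALoop : List Char → List Char → List (List Char) → List (List Char)
  | [], cur, lines => if cur = [] then lines else lines ++ [cur]
  | c :: rest, cur, lines =>
    if c = '\n' then pvALoop rest [] (lines ++ [cur])
    else if c = '\r' then
      if rest.head? = some '\n' then pvALoop rest.tail [] (lines ++ [cur])
      else pvALoop rest [] lines
    else pvALoop rest (cur ++ [c]) lines
termination_by cs _ _ => cs.length
decreasing_by all_goals (simp [List.length_tail]; try omega)

def process_carriage_return (text : String) : String :=
  if ¬ ('\r' ∈ text.toList) then text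
  else String.ofList (List.intercalate ['\n'] (pvALoop text.toList [] []))

-- ===== PORT B =====
-- text.replace('\r\n', '\n'): exact char-level port of Python's left-to-right non-overlapping replace of the 2-char pattern
def pvNorm : List Char → List Char
  | [] => []
  | c :: rest =>
    if c = '\r' ∧ rest.head? = some '\n' then '\n' :: pvNorm rest.tail
    else c :: pvNorm rest
termination_by cs => cs.length
decreasing_by all_goals (simp [List.length_tail]; try omega)

-- s.split('\n'): exact char-level port
def pvSplit : List Char → List (List Char)
  | [] => [[]]
  | c :: r =>
    if c = '\n' then [] :: pvSplit r
    else
      match pvSplit r with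
      | [] => [[c]]          -- unreachable: pvSplit never returns []
      | s :: ss => (c :: s) :: ss

-- seg.rpartition('\r')[2]: the suffix after the last '\r' (exact: one scan keeping the text seen since the last '\r')
def pvAfterCR : List Char → List Char → List Char
  | [], acc => acc
  | c :: r, acc => if c = '\r' then pvAfterCR r [] else pvAfterCR r (acc ++ [c])

def process_carriage_return_alt (text : String) : String :=
  if ¬ ('\r' ∈ text.toList) then text
  else
    let segments := (pvSplit (pvNorm text.toList)).map (fun s => pvAfterCR s [])
    let segments2 := if segments ≠ [] ∧ segments.getLast? = some [] then segments.dropLast else segments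
    String.ofList (List.intercalate ['\n'] segments2)

-- ===== PRECONDITION & SPEC =====
def Spec_process_carriage_return (text : String) (out : String) : Prop := out = process_carriage_return_alt text
instance (text : String) (out : String) : Decidable (Spec_process_carriage_return text out) := by unfold Spec_process_carriage_return; infer_instance

-- ===== CLAIM (what is proved, stated in full; the proofs are below) =====
def Claim_equal_process_carriage_return : Prop := ∀ (text : String), Dom_process_carriage_return text → Spec_process_carriage_return text (process_carriage_return text)

-- ===== LEMMAS AND PROOFS =====

-- the per-line list B computes, with the first (current) line seeded by cur
def pvLines (cs cur : List Char) : List (List Char) :=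
  match pvSplit (pvNorm cs) with
  | [] => []
  | s :: ss => pvAfterCR s cur :: ss.map (fun t => pvAfterCR t [])

def pvFinal (L : List (List Char)) : List (List Char) :=
  if L.getLast? = some [] then L.dropLast else L

theorem pvSplit_ne_nil (l : List Char) : pvSplit l ≠ [] := by
  cases l with
  | nil => simp [pvSplit]
  | cons c r =>
    simp only [pvSplit]
    split_ifs
    · simp
    · cases h : pvSplit r <;> simp

theorem pvLines_ne_nil (cs cur : List Char) : pvLines cs cur ≠ [] := by
  unfold pvLines
  cases h : pvSplit (pvNorm cs) with
  | nil => exact absurd h (pvSplit_ne_nil _)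
  | cons s ss => simp

theorem pvFinal_cons (a : List Char) (L : List (List Char)) (h : L ≠ []) :
    pvFinal (a :: L) = a :: pvFinal L := by
  unfold pvFinal
  cases L with
  | nil => exact absurd rfl h
  | cons b M =>
    rw [List.getLast?_cons_cons, List.dropLast_cons_of_ne_nil (by simp)]
    split_ifs <;> rfl

theorem pvLines_nil (cur : List Char) : pvLines [] cur = [cur] := by
  simp [pvLines, pvNorm, pvSplit, pvAfterCR]

theorem pvLines_newline (r cur : List Char) :
    pvLines ('\n' :: r) cur = cur :: pvLines r [] := by
  unfold pvLines
  have h1 : pvNorm ('\n' :: r) = '\n' :: pvNorm r := by simp [pvNorm]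
  have h2 : pvSplit ('\n' :: pvNorm r) = [] :: pvSplit (pvNorm r) := by simp [pvSplit]
  rw [h1, h2]
  cases h : pvSplit (pvNorm r) with
  | nil => exact absurd h (pvSplit_ne_nil _)
  | cons s ss => simp [pvAfterCR]

theorem pvLines_crnl (r cur : List Char) :
    pvLines ('\r' :: '\n' :: r) cur = cur :: pvLines r [] := by
  have h1 : pvNorm ('\r' :: '\n' :: r) = '\n' :: pvNorm r := by simp [pvNorm]
  have h2 : pvSplit ('\n' :: pvNorm r) = [] :: pvSplit (pvNorm r) := by simp [pvSplit]
  unfold pvLines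
  rw [h1, h2]
  cases h : pvSplit (pvNorm r) with
  | nil => exact absurd h (pvSplit_ne_nil _)
  | cons s ss => simp [pvAfterCR]

theorem pvLines_cr (r cur : List Char) (h : r.head? ≠ some '\n') :
    pvLines ('\r' :: r) cur = pvLines r [] := by
  have h1 : pvNorm ('\r' :: r) = '\r' :: pvNorm r := by
    rw [pvNorm]; simp [h]
  have h2 : pvSplit ('\r' :: pvNorm r) = match pvSplit (pvNorm r) with
      | [] => [['\r']] | s :: ss => ('\r' :: s) :: ss := by
    rw [pvSplit]; simp
  unfold pvLines
  rw [h1, h2]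
  cases hs : pvSplit (pvNorm r) with
  | nil => exact absurd hs (pvSplit_ne_nil _)
  | cons s ss => simp [pvAfterCR]

theorem pvLines_char (c : Char) (r cur : List Char) (hn : c ≠ '\n') (hr : c ≠ '\r') :
    pvLines (c :: r) cur = pvLines r (cur ++ [c]) := by
  have h1 : pvNorm (c :: r) = c :: pvNorm r := by rw [pvNorm]; simp [hr]
  have h2 : pvSplit (c :: pvNorm r) = match pvSplit (pvNorm r) with
      | [] => [[c]] | s :: ss => (c :: s) :: ss := by
    rw [pvSplit]; simp [hn]
  unfold pvLines
  rw [h1, h2]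
  cases hs : pvSplit (pvNorm r) with
  | nil => exact absurd hs (pvSplit_ne_nil _)
  | cons s ss => simp [pvAfterCR, hr]

theorem pvALoop_eq : ∀ (cs cur : List Char) (lines : List (List Char)),
    pvALoop cs cur lines = lines ++ pvFinal (pvLines cs cur) := by
  intro cs cur lines
  induction cs, cur, lines using pvALoop.induct with
  | case1 cur => simp [pvALoop, pvLines_nil, pvFinal]
  | case2 a b hne => simp [pvALoop, hne, pvLines_nil, pvFinal]
  | case3 a b c ih =>
    rw [pvALoop, if_pos rfl, ih, pvLines_newline, pvFinal_cons _ _ (pvLines_ne_nil a [])]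
    simp
  | case4 a b c hh hne ih =>
    cases a with
    | nil => simp at hh
    | cons x xs =>
      simp only [List.head?_cons, Option.some.injEq] at hh
      subst hh
      simp only [List.tail_cons] at ih
      rw [pvALoop, if_neg (show ¬('\r' = '\n') by decide), if_pos (by simp), List.tail_cons,
        ih, pvLines_crnl, pvFinal_cons _ _ (pvLines_ne_nil xs [])]
      simp
  | case5 a b c hh hne ih =>
    rw [pvALoop, if_neg (show ¬('\r' = '\n') by decide), if_neg hh, ih, pvLines_cr _ _ hh]
    simp
  | case6 a b c d hn hr ih =>
    rw [pvALoop, if_neg hn, if_neg hr, ih, pvLines_char _ _ _ hn hr]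

theorem pvLines_eq_map (cs : List Char) :
    pvLines cs [] = (pvSplit (pvNorm cs)).map (fun s => pvAfterCR s []) := by
  unfold pvLines
  cases h : pvSplit (pvNorm cs) with
  | nil => exact absurd h (pvSplit_ne_nil _)
  | cons s ss => simp

-- ===== VERDICT (by name: the statement is the Claim_ definition above) =====
theorem process_carriage_return_spec : Claim_equal_process_carriage_return := by
  intro text _
  unfold Spec_process_carriage_return process_carriage_return process_carriage_return_alt
  by_cases h : '\r' ∈ text.toList
  · simp only [h, not_true_eq_false, if_false]
    rw [pvALoop_eq, ← pvLines_eq_map]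
    have hne := pvLines_ne_nil text.toList []
    unfold pvFinal
    simp [hne]
  · simp [h]
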